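-- pv_equiv track=rewrite | github.com/hellokena/Programmers | 코딩테스트 연습/Level 1/완전탐색_모의고사.py | solution
-- ===== SOURCE A (Python) =====
-- def solution(answers):
--
--     answer = []
--     score1 = 0
--     score2 = 0
--     score3 = 0
--
--     std1 = [1,2,3,4,5]
--     std2 = [2,1,2,3,2,4,2,5]
--     std3 = [3,3,1,1,2,2,4,4,5,5]
--
--     for i in range(len(answers)):
--         if std1[i%len(std1)] == answers[i]:
--             score1 += 1
--         if std2[i%len(std2)] == answers[i]:
--             score2 += 1
--         if std3[i%len(std3)] == answers[i]:
--             score3 += 1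
--
--     temp = [score1, score2, score3]
--
--     for j,v in enumerate(temp):
--         if v == max(temp):
--             answer.append(j+1)
--
--     return answer
-- ===== SOURCE B (Python) =====
-- def solution(answers):
--     # The three cycle lengths (5, 8, 10) divide 40, so position i behaves like
--     # position i % 40.  Build one frequency table keyed by (i % 40, answer);
--     # each score is then a fixed 40-term lookup sum, independent of the answers.
--     CYCLE = 40
--     freq = {}
--     for i, a in enumerate(answers):
--         k = (i % CYCLE, a)
--         freq[k] = freq.get(k, 0) + 1
--     patterns = [[1, 2, 3, 4, 5],
--                 [2, 1, 2, 3, 2, 4, 2, 5],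
--                 [3, 3, 1, 1, 2, 2, 4, 4, 5, 5]]
--     scores = [sum(freq.get((r, p[r % len(p)]), 0) for r in range(CYCLE))
--               for p in patterns]
--     best = max(scores)
--     return [j + 1 for j, s in enumerate(scores) if s == best]
-- ===== Notes on version B (the rewrite author's own statement) =====
-- stated objective: alternative
-- what changed: Replaces A's per-index matching of each answer against the three cyclic patterns by a frequency table keyed by (i mod 40, answer) built in one pass (40 = lcm of the cycle lengths), each score then being a fixed 40-term table-lookup sum.
import Mathlib
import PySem

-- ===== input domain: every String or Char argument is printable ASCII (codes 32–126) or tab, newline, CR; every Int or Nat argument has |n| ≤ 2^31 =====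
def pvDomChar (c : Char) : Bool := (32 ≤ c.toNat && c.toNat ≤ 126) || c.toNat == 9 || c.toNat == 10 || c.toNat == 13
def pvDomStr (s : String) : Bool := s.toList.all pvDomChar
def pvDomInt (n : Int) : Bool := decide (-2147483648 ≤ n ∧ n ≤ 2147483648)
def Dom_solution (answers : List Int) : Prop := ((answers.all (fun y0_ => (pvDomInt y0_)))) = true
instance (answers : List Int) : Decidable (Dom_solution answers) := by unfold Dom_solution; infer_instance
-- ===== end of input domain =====

-- B replaces A's per-index pattern matching by a frequency table keyed by (i % 40, answer)
-- built in one pass, with each score a fixed 40-term lookup sum (alternative algorithm;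
-- correct because the three cycle lengths 5, 8, 10 divide 40).


-- ===== PORT A =====
def solution (answers : List Int) : List Int :=
  let std1 : List Int := [1, 2, 3, 4, 5]
  let std2 : List Int := [2, 1, 2, 3, 2, 4, 2, 5]
  let std3 : List Int := [3, 3, 1, 1, 2, 2, 4, 4, 5, 5]
  -- the loop 'for i in range(len(answers))' keeping the three counters
  let s : Int × Int × Int :=
    (PySem.List.pyRange 0 (answers.length : Int) 1).foldl
      (fun (s : Int × Int × Int) i =>
        ((if PySem.List.pyGetD std1 (PySem.Int.mod i (std1.length : Int)) 0 == PySem.List.pyGetD answers i 0 then s.1 + 1 else s.1),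
         (if PySem.List.pyGetD std2 (PySem.Int.mod i (std2.length : Int)) 0 == PySem.List.pyGetD answers i 0 then s.2.1 + 1 else s.2.1),
         (if PySem.List.pyGetD std3 (PySem.Int.mod i (std3.length : Int)) 0 == PySem.List.pyGetD answers i 0 then s.2.2 + 1 else s.2.2)))
      (0, 0, 0)
  let temp : List Int := [s.1, s.2.1, s.2.2]
  -- 'for j,v in enumerate(temp): if v == max(temp): answer.append(j+1)'
  (PySem.List.enumerate temp 0).foldl
    (fun acc jv => if jv.2 == (PySem.List.max? temp (fun x => x)).getD 0 then acc ++ [jv.1 + 1] else acc) []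

-- ===== PORT B =====
-- 'for i, a in enumerate(answers): k = (i % 40, a); freq[k] = freq.get(k, 0) + 1'
def freqOf (answers : List Int) : PySem.Dict (Int × Int) Int :=
  (PySem.List.enumerate answers 0).foldl
    (fun d ia =>
      let k : Int × Int := (PySem.Int.mod ia.1 40, ia.2)
      d.insert k (d.getD k 0 + 1))
    PySem.Dict.empty

-- 'sum(freq.get((r, p[r % len(p)]), 0) for r in range(40))'
def altScore (freq : PySem.Dict (Int × Int) Int) (p : List Int) : Int :=
  ((PySem.List.pyRange 0 40 1).map
    (fun r => freq.getD (r, PySem.List.pyGetD p (PySem.Int.mod r (p.length : Int)) 0) 0)).sum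

def solution_alt (answers : List Int) : List Int :=
  let freq := freqOf answers
  let patterns : List (List Int) :=
    [[1, 2, 3, 4, 5], [2, 1, 2, 3, 2, 4, 2, 5], [3, 3, 1, 1, 2, 2, 4, 4, 5, 5]]
  let scores : List Int := patterns.map (fun p => altScore freq p)
  let best : Int := (PySem.List.max? scores (fun x => x)).getD 0
  ((PySem.List.enumerate scores 0).filter (fun p => p.2 == best)).map (fun p => p.1 + 1)

-- ===== PRECONDITION & SPEC =====
def Spec_solution (answers : List Int) (out : List Int) : Prop := out = solution_alt answers
instance (answers : List Int) (out : List Int) : Decidable (Spec_solution answers out) := by unfold Spec_solution; infer_instance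

-- ===== CLAIM (what is proved, stated in full; the proofs are below) =====
def Claim_equal_solution : Prop := ∀ (answers : List Int), Dom_solution answers → Spec_solution answers (solution answers)

-- ===== LEMMAS AND PROOFS =====

-- A's triple-counter fold equals three independent counts.
theorem foldl_triple {β : Type} (l : List β) (q1 q2 q3 : β → Bool) (c : Int × Int × Int) :
    l.foldl
      (fun (s : Int × Int × Int) p =>
        ((if q1 p then s.1 + 1 else s.1),
         (if q2 p then s.2.1 + 1 else s.2.1),
         (if q3 p then s.2.2 + 1 else s.2.2))) c
    = (c.1 + (l.countP q1 : Int), c.2.1 + (l.countP q2 : Int), c.2.2 + (l.countP q3 : Int)) := by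
  induction l generalizing c with
  | nil => simp
  | cons x t ih =>
    simp only [List.foldl_cons, ih, List.countP_cons]
    obtain ⟨a, b, d⟩ := c
    by_cases h1 : q1 x <;> by_cases h2 : q2 x <;> by_cases h3 : q3 x <;>
      simp [h1, h2, h3, Prod.ext_iff] <;> omega

-- summing the indicator of one key over a duplicate-free list of candidate first
-- components picks out exactly the matching candidate
theorem sum_indicator_key (R : List Int) (f : Int → Int) (i a : Int)
    (hnd : R.Nodup) (hmem : i ∈ R) :
    ((R.map (fun r => if ((r, f r) : Int × Int) == (i, a) then (1 : Int) else 0)).sum)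
      = if f i == a then (1 : Int) else 0 := by
  induction R with
  | nil => cases hmem
  | cons r t ih =>
    by_cases hir : i = r
    · subst hir
      have hni : i ∉ t := (List.nodup_cons.mp hnd).1
      have hz : ((t.map (fun s => if ((s, f s) : Int × Int) == (i, a) then (1 : Int) else 0)).sum) = 0 := by
        rw [List.sum_eq_zero]
        intro x hx
        rcases List.mem_map.mp hx with ⟨s, hs, rfl⟩
        have hne : ¬ (((s, f s) : Int × Int) = (i, a)) :=
          fun e => hni ((show s = i from congrArg Prod.fst e) ▸ hs)
        simp [hne]
      rw [List.map_cons, List.sum_cons, hz]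
      by_cases hfa : f i = a <;> simp [hfa]
    · have hm : i ∈ t := (List.mem_cons.mp hmem).resolve_left hir
      rw [List.map_cons, List.sum_cons, ih (List.nodup_cons.mp hnd).2 hm]
      have hne : ¬ (((r, f r) : Int × Int) = (i, a)) :=
        fun e => hir (show r = i from congrArg Prod.fst e).symm
      simp [hne]

-- B's 40-term sum of residue-class counts is A's per-element match count
theorem sum_count_eq_countP (L : List (Int × Int)) (f : Int → Int)
    (hb : ∀ x ∈ L, 0 ≤ x.1 ∧ x.1 < 40) :
    ((PySem.List.pyRange 0 40 1).map (fun r => (L.count ((r, f r) : Int × Int) : Int))).sum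
      = (L.countP (fun x => f x.1 == x.2) : Int) := by
  induction L with
  | nil => simp
  | cons x t ih =>
    obtain ⟨i, a⟩ := x
    have hx := hb (i, a) (List.mem_cons_self ..)
    have ht : ∀ y ∈ t, 0 ≤ y.1 ∧ y.1 < 40 := fun y hy => hb y (List.mem_cons_of_mem _ hy)
    have hsplit : ∀ r : Int,
        (((i, a) :: t).count ((r, f r) : Int × Int) : Int)
          = (t.count ((r, f r) : Int × Int) : Int)
            + (if ((r, f r) : Int × Int) == (i, a) then (1 : Int) else 0) := by
      intro r
      rw [List.count_cons]
      by_cases h : ((i, a) : Int × Int) == (r, f r)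
      · have h' : ((r, f r) : Int × Int) == (i, a) := by
          simp only [beq_iff_eq] at h ⊢; exact h.symm
        simp [h, h']
      · have h' : ¬ (((r, f r) : Int × Int) == (i, a)) := by
          simp only [beq_iff_eq] at h ⊢; exact fun e => h e.symm
        simp [h, h']
    have hmap : ((PySem.List.pyRange 0 40 1).map
          (fun r => ((((i, a) :: t).count ((r, f r) : Int × Int)) : Int))).sum
        = ((PySem.List.pyRange 0 40 1).map (fun r => (t.count ((r, f r) : Int × Int) : Int))).sum
          + ((PySem.List.pyRange 0 40 1).map
              (fun r => if ((r, f r) : Int × Int) == (i, a) then (1 : Int) else 0)).sum := by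
      rw [← List.sum_map_add]
      exact congrArg List.sum (List.map_congr_left (fun r _ => hsplit r))
    rw [hmap, ih ht, sum_indicator_key _ f i a
        (by decide) (PySem.List.mem_pyRange_one.mpr ⟨hx.1, hx.2⟩)]
    rw [List.countP_cons]
    by_cases hfa : f i == a <;> simp [hfa]

-- A's appending loop over enumerate(temp) is the filter/map comprehension.
theorem tail_eq (l : List Int) (m : Int) :
    (PySem.List.enumerate l 0).foldl
      (fun acc jv => if jv.2 == m then acc ++ [jv.1 + 1] else acc) ([] : List Int)
    = ((PySem.List.enumerate l 0).filter (fun p => p.2 == m)).map (fun p => p.1 + 1) := by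
  simpa using PySem.List.foldl_append_if
    (fun jv : Int × Int => jv.2 == m) (fun jv => jv.1 + 1) (PySem.List.enumerate l 0) []

-- B's score via the frequency table equals A's direct match count, for each of the
-- three patterns (cycle length dividing 40)
theorem altScore_eq (answers p : List Int) (hlen : 0 < p.length) (hdvd : (p.length : Int) ∣ 40) :
    altScore (freqOf answers) p
      = ((PySem.List.enumerate answers 0).countP
          (fun ia => PySem.List.pyGetD p (PySem.Int.mod ia.1 (p.length : Int)) 0 == ia.2) : Int) := by
  have hfreq : freqOf answers
      = PySem.Dict.counter ((PySem.List.enumerate answers 0).map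
          (fun ia => ((PySem.Int.mod ia.1 40, ia.2) : Int × Int))) := by
    unfold freqOf
    rw [← PySem.Dict.foldl_insert_getD_add_one_eq_counter, List.foldl_map]
  unfold altScore
  rw [hfreq]
  simp only [PySem.Dict.getD_counter]
  rw [sum_count_eq_countP _ (fun r => PySem.List.pyGetD p (PySem.Int.mod r (p.length : Int)) 0)
      (by
        intro x hx
        rcases List.mem_map.mp hx with ⟨ia, _, rfl⟩
        exact ⟨PySem.Int.mod_nonneg _ (by norm_num), PySem.Int.mod_lt _ (by norm_num)⟩)]
  rw [List.countP_map]
  refine congrArg Nat.cast (List.countP_congr ?_)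
  intro ia _
  have hplen : (0 : Int) < (p.length : Int) := by exact_mod_cast hlen
  have hmm : PySem.Int.mod (PySem.Int.mod ia.1 40) (p.length : Int)
      = PySem.Int.mod ia.1 (p.length : Int) := by
    rw [PySem.Int.mod_eq_emod_of_pos (by norm_num : (0:Int) < 40),
        PySem.Int.mod_eq_emod_of_pos hplen, PySem.Int.mod_eq_emod_of_pos hplen]
    exact Int.emod_emod_of_dvd _ hdvd
  simp only [Function.comp_apply]
  rw [hmm]

-- ===== VERDICT (by name: the statement is the Claim_ definition above) =====
theorem solution_spec : Claim_equal_solution := by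
  intro answers _
  show solution answers = solution_alt answers
  simp only [solution, solution_alt]
  have hf := foldl_triple (PySem.List.pyRange 0 (answers.length : Int) 1)
    (fun i => PySem.List.pyGetD [1, 2, 3, 4, 5]
      (PySem.Int.mod i ((List.length ([1, 2, 3, 4, 5] : List Int) : Int))) 0 == PySem.List.pyGetD answers i 0)
    (fun i => PySem.List.pyGetD [2, 1, 2, 3, 2, 4, 2, 5]
      (PySem.Int.mod i ((List.length ([2, 1, 2, 3, 2, 4, 2, 5] : List Int) : Int))) 0 == PySem.List.pyGetD answers i 0)
    (fun i => PySem.List.pyGetD [3, 3, 1, 1, 2, 2, 4, 4, 5, 5]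
      (PySem.Int.mod i ((List.length ([3, 3, 1, 1, 2, 2, 4, 4, 5, 5] : List Int) : Int))) 0 == PySem.List.pyGetD answers i 0)
    (0, 0, 0)
  rw [hf]
  rw [List.map_cons, List.map_cons, List.map_cons, List.map_nil]
  rw [altScore_eq answers _ (by decide) (by decide),
      altScore_eq answers _ (by decide) (by decide),
      altScore_eq answers _ (by decide) (by decide)]
  simp only [PySem.List.enumerate_eq_map_pyRange answers 0, List.countP_map, Function.comp_def,
      zero_add]
  exact tail_eq _ _
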